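-- pv_equiv track=rewrite | github.com/starkizard/CrudeCode | Codeforces/Codeforces Round #638 (Div 2)/B-phoenixAndBeauty.py | beautiful
-- ===== SOURCE A (Python) =====
-- def beautiful(arr,k):
--     s=sum(arr[:k])
--     bool=True
--     for i in range(len(arr)-k+1):
--         if sum(arr[i:i+k])!=s:
--             bool=False
--             return False
--     return True
-- ===== SOURCE B (Python) =====
-- def beautiful(arr, k):
--     # All k-length windows have equal sum iff every element equals the one
--     # k positions later (consecutive window sums differ by arr[i+k] - arr[i]).
--     n = len(arr)
--     return all(arr[i] == arr[i + k] for i in range(n - k))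
-- ===== Notes on version B (the rewrite author's own statement) =====
-- stated objective: faster
-- what changed: Instead of re-summing every k-length slice, B uses the telescoping fact that consecutive window sums differ by arr[i+k]-arr[i], so it just checks arr[i]==arr[i+k] for every i in one pass with no slicing or summing.
-- outside the precondition, e.g. on beautiful([1, 1], -1): A returns False, B raises IndexError
import Mathlib
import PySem

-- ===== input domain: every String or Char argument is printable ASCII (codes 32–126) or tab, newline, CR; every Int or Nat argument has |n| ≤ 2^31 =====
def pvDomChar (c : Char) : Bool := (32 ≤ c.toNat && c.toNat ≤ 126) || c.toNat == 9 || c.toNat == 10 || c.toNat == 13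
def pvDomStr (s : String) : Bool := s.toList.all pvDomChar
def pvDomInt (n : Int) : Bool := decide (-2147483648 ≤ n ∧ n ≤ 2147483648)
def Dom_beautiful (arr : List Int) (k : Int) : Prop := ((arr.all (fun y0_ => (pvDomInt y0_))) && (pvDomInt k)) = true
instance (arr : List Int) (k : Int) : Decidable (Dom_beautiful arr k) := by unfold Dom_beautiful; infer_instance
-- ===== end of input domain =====

-- B replaces A's per-window re-summation (O(n*k)) by the one-pass check arr[i] == arr[i+k];
-- equivalence proved for k ≥ 0 (return values only).

-- ===== PORT A =====
-- the 'for i in range(...): if sum(arr[i:i+k]) != s: return False' loop, with its early return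
def beautifulLoop (arr : List Int) (k s : Int) : List Int → Bool
  | [] => true
  | i :: rest =>
    if (PySem.List.slice arr (some i) (some (i + k))).sum ≠ s then false
    else beautifulLoop arr k s rest

def beautiful (arr : List Int) (k : Int) : Bool :=
  let s := (PySem.List.slice arr none (some k)).sum
  beautifulLoop arr k s (PySem.List.pyRange 0 ((arr.length : Int) - k + 1) 1)

-- ===== PORT B =====
def beautiful_alt (arr : List Int) (k : Int) : Bool :=
  (PySem.List.pyRange 0 ((arr.length : Int) - k) 1).all
    (fun i => PySem.List.pyGet? arr i == PySem.List.pyGet? arr (i + k))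

-- ===== PRECONDITION & SPEC =====
-- Pre_ restricts to the task's natural domain k ≥ 0: on negative k (a length, never negative
-- for this problem) A returns an accidental value while B's index arr[i+k] raises IndexError.
def Pre_beautiful (arr : List Int) (k : Int) : Prop := 0 ≤ k
instance (arr : List Int) (k : Int) : Decidable (Pre_beautiful arr k) := by
  unfold Pre_beautiful; infer_instance
def pvWitness_beautiful : List Int × Int := ([1, 2, 1, 2], 2)
def Spec_beautiful (arr : List Int) (k : Int) (out : Bool) : Prop := out = beautiful_alt arr k
instance (arr : List Int) (k : Int) (out : Bool) : Decidable (Spec_beautiful arr k out) := by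
  unfold Spec_beautiful; infer_instance

-- ===== CLAIM (what is proved, stated in full; the proofs are below) =====
def Claim_equal_beautiful : Prop := ∀ (arr : List Int) (k : Int), Dom_beautiful arr k → Pre_beautiful arr k → Spec_beautiful arr k (beautiful arr k)

-- ===== LEMMAS AND PROOFS =====

-- the window sum starting at position m
def pvW (arr : List Int) (kn m : ℕ) : Int := ((arr.drop m).take kn).sum

theorem beautifulLoop_eq_all (arr : List Int) (k s : Int) (l : List Int) :
    beautifulLoop arr k s l =
      l.all (fun i => (PySem.List.slice arr (some i) (some (i + k))).sum == s) := by
  induction l with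
  | nil => rfl
  | cons i rest ih =>
    simp only [beautifulLoop, List.all_cons, ih]
    by_cases h : (PySem.List.slice arr (some i) (some (i + k))).sum = s <;> simp [h]

-- consecutive window sums differ by arr[m+kn] - arr[m]
theorem pvW_step (arr : List Int) (kn m : ℕ) (hkn : 1 ≤ kn) (h : m + kn < arr.length) :
    pvW arr kn (m + 1) + arr.getD m 0 = pvW arr kn m + arr.getD (m + kn) 0 := by
  obtain ⟨j, rfl⟩ : ∃ j, kn = j + 1 := ⟨kn - 1, by omega⟩
  have hm : m < arr.length := by omega
  have hdrop : arr.drop m = arr[m] :: arr.drop (m + 1) := List.drop_eq_getElem_cons hm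
  have hjlen : j < (arr.drop (m + 1)).length := by
    rw [List.length_drop]; omega
  have htake : (arr.drop (m + 1)).take (j + 1)
      = (arr.drop (m + 1)).take j ++ [(arr.drop (m + 1))[j]] := by
    rw [List.take_add_one, List.getElem?_eq_getElem hjlen]; rfl
  have hidx : (arr.drop (m + 1))[j] = arr[m + 1 + j]'(by omega) := by
    simp [List.getElem_drop]
  unfold pvW
  rw [hdrop, List.take_succ_cons, htake, hidx]
  rw [List.getD_eq_getElem _ _ hm, List.getD_eq_getElem _ _ h]
  simp only [List.sum_cons, List.sum_append, List.sum_nil,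
    show m + 1 + j = m + (j + 1) from by omega]
  ring

-- pairwise equality at distance kn implies every window sum equals the first
theorem pvW_const (arr : List Int) (kn : ℕ) (hkn : 1 ≤ kn)
    (hB : ∀ m : ℕ, m + kn < arr.length → arr.getD m 0 = arr.getD (m + kn) 0) :
    ∀ m : ℕ, m + kn ≤ arr.length → pvW arr kn m = pvW arr kn 0 := by
  intro m
  induction m with
  | zero => intro _; rfl
  | succ p ih =>
    intro h
    have hp : p + kn < arr.length := by omega
    have := pvW_step arr kn p hkn hp
    have hbe := hB p hp
    have := ih (by omega)
    omega

theorem window_sums_iff_pairs (arr : List Int) (kn : ℕ) (hkn : 1 ≤ kn) :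
    (∀ m : ℕ, m + kn ≤ arr.length → pvW arr kn m = pvW arr kn 0) ↔
      (∀ m : ℕ, m + kn < arr.length → arr.getD m 0 = arr.getD (m + kn) 0) := by
  constructor
  · intro hA m hm
    have h1 := hA m (by omega)
    have h2 := hA (m + 1) (by omega)
    have := pvW_step arr kn m hkn hm
    omega
  · exact fun hB m hm => pvW_const arr kn hkn hB m hm

-- A = true ↔ every window sum equals the first
theorem beautiful_iff (arr : List Int) (kn : ℕ) :
    beautiful arr (kn : Int) = true ↔
      (∀ m : ℕ, m + kn ≤ arr.length → pvW arr kn m = pvW arr kn 0) := by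
  unfold beautiful
  rw [beautifulLoop_eq_all, List.all_eq_true]
  constructor
  · intro h m hm
    have hmem : (m : Int) ∈ PySem.List.pyRange 0 ((arr.length : Int) - kn + 1) 1 := by
      rw [PySem.List.mem_pyRange_one]
      exact ⟨by positivity, by omega⟩
    have := h _ hmem
    rw [beq_iff_eq] at this
    rw [PySem.List.slice_natCast_add] at this
    rw [PySem.List.slice_to_natCast] at this
    unfold pvW
    simpa using this
  · intro h i hi
    rw [PySem.List.mem_pyRange_one] at hi
    obtain ⟨hi0, hi1⟩ := hi
    obtain ⟨m, rfl⟩ : ∃ m : ℕ, i = (m : Int) := ⟨i.toNat, (Int.toNat_of_nonneg hi0).symm⟩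
    rw [beq_iff_eq, PySem.List.slice_natCast_add, PySem.List.slice_to_natCast]
    have hm : m + kn ≤ arr.length := by omega
    have := h m hm
    unfold pvW at this
    simpa using this

-- B = true ↔ pairwise equality at distance kn
theorem beautiful_alt_iff (arr : List Int) (kn : ℕ) :
    beautiful_alt arr (kn : Int) = true ↔
      (∀ m : ℕ, m + kn < arr.length → arr.getD m 0 = arr.getD (m + kn) 0) := by
  unfold beautiful_alt
  rw [List.all_eq_true]
  constructor
  · intro h m hm
    have hmem : (m : Int) ∈ PySem.List.pyRange 0 ((arr.length : Int) - kn) 1 := by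
      rw [PySem.List.mem_pyRange_one]
      exact ⟨by positivity, by omega⟩
    have := h _ hmem
    rw [beq_iff_eq] at this
    have hc : (m : Int) + (kn : Int) = ((m + kn : ℕ) : Int) := by push_cast; ring
    rw [hc, PySem.List.pyGet?_natCast, PySem.List.pyGet?_natCast] at this
    rw [List.getElem?_eq_getElem (show m < arr.length by omega),
        List.getElem?_eq_getElem hm, Option.some_inj] at this
    rw [List.getD_eq_getElem _ _ (show m < arr.length by omega),
        List.getD_eq_getElem _ _ hm]
    exact this
  · intro h i hi
    rw [PySem.List.mem_pyRange_one] at hi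
    obtain ⟨hi0, hi1⟩ := hi
    obtain ⟨m, rfl⟩ : ∃ m : ℕ, i = (m : Int) := ⟨i.toNat, (Int.toNat_of_nonneg hi0).symm⟩
    have hm : m + kn < arr.length := by omega
    rw [beq_iff_eq]
    have hc : (m : Int) + (kn : Int) = ((m + kn : ℕ) : Int) := by push_cast; ring
    rw [hc, PySem.List.pyGet?_natCast, PySem.List.pyGet?_natCast]
    rw [List.getElem?_eq_getElem (show m < arr.length by omega),
        List.getElem?_eq_getElem hm, Option.some_inj]
    have := h m hm
    rwa [List.getD_eq_getElem _ _ (show m < arr.length by omega),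
        List.getD_eq_getElem _ _ hm] at this

theorem beautiful_eq_alt_nat (arr : List Int) (kn : ℕ) :
    beautiful arr (kn : Int) = beautiful_alt arr (kn : Int) := by
  rw [Bool.eq_iff_iff, beautiful_iff, beautiful_alt_iff]
  rcases Nat.eq_zero_or_pos kn with h0 | h1
  · subst h0
    constructor
    · intro _ m _; simp
    · intro _ m _; simp [pvW]
  · exact window_sums_iff_pairs arr kn h1

-- ===== VERDICT (by name: the statement is the Claim_ definition above) =====
theorem beautiful_spec : Claim_equal_beautiful := by
  intro arr k _ hk
  unfold Spec_beautiful
  obtain ⟨kn, rfl⟩ : ∃ kn : ℕ, k = (kn : Int) := ⟨k.toNat, (Int.toNat_of_nonneg hk).symm⟩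
  exact beautiful_eq_alt_nat arr kn
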